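-- pv_equiv track=rewrite | github.com/alexmarianetti100-debug/archive-arbitrage | marketing/auto_content/market_report.py | _extract_brand_from_query
-- ===== SOURCE A (Python) =====
-- def _extract_brand_from_query(query: str) -> str:
--     """Extract the brand name from a search query."""
--     known_brands = [
--         "chrome hearts", "rick owens", "maison margiela", "margiela",
--         "enfants riches deprimes", "erd", "saint laurent", "jean paul gaultier",
--         "helmut lang", "raf simons", "bottega veneta", "dior homme",
--         "undercover", "balenciaga", "kapital", "number nine",
--         "alexander mcqueen", "thierry mugler", "vivienne westwood",
--         "julius", "ann demeulemeester", "dries van noten", "yohji yamamoto",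
--         "prada", "guidi", "acne studios", "carol christian poell",
--     ]
--     query_lower = query.lower()
--     for brand in sorted(known_brands, key=len, reverse=True):
--         if query_lower.startswith(brand):
--             return brand.title()
--     return query.split()[0].title() if query else "Unknown"
-- ===== SOURCE B (Python) =====
-- def _extract_brand_from_query(query: str) -> str:
--     """Extract the brand name from a search query."""
--     known_brands = [
--         "chrome hearts", "rick owens", "maison margiela", "margiela",
--         "enfants riches deprimes", "erd", "saint laurent", "jean paul gaultier",
--         "helmut lang", "raf simons", "bottega veneta", "dior homme",
--         "undercover", "balenciaga", "kapital", "number nine",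
--         "alexander mcqueen", "thierry mugler", "vivienne westwood",
--         "julius", "ann demeulemeester", "dries van noten", "yohji yamamoto",
--         "prada", "guidi", "acne studios", "carol christian poell",
--     ]
--     # Iterate over PREFIXES OF THE QUERY (longest first) and look each one up in
--     # a hash set of brands, instead of scanning the brand list for a match.
--     brand_set = set(known_brands)
--     max_len = max(len(b) for b in known_brands)
--     query_lower = query.lower()
--     for length in range(min(len(query_lower), max_len), 0, -1):
--         prefix = query_lower[:length]
--         if prefix in brand_set:
--             return prefix.title()
--     return query.split()[0].title() if query else "Unknown"
-- ===== Notes on version B (the rewrite author's own statement) =====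
-- stated objective: alternative
-- what changed: Inverts the search: instead of scanning the brand list sorted by length for one that prefixes the query, B walks the query's own prefixes longest-first (lengths min(len(query), max brand length)..1) and looks each up in a hash set of brands; correct because the longest query prefix that is a brand is exactly the longest brand that prefixes the query. Pre_ excludes nonempty all-whitespace queries, on which A's query.split()[0] raises IndexError (B raises there too).
import Mathlib
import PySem

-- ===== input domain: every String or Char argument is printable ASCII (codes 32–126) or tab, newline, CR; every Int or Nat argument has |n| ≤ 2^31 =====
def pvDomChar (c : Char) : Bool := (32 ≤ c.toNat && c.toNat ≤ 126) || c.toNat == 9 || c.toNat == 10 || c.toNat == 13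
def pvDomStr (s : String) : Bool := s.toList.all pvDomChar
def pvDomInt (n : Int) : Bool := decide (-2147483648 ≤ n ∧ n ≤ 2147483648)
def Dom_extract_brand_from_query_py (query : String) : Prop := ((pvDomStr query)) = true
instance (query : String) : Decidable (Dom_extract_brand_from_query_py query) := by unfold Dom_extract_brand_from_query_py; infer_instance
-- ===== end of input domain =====

-- B inverts the search: instead of scanning the brand list (sorted by length) for one that
-- prefixes the query, it walks the query's own prefixes longest-first and looks each up in a
-- hash set of brands (objective: alternative).

-- shared helpers: the brand list both Pythons carry, and a hand port of str.title()
-- (exact on ASCII: a letter is uppercased when the previous character is not a letter, lowercased otherwise)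
def pvTitleChars : List Char → Bool → List Char
  | [], _ => []
  | c :: cs, prevAlpha =>
      (if PySem.Chars.isalpha c then
        (if prevAlpha then PySem.Chars.lowerChar c else PySem.Chars.upperChar c)
       else c) :: pvTitleChars cs (PySem.Chars.isalpha c)

def pvTitle (s : String) : String := String.ofList (pvTitleChars s.toList false)

def pvKnownBrands : List String :=
  ["chrome hearts", "rick owens", "maison margiela", "margiela",
   "enfants riches deprimes", "erd", "saint laurent", "jean paul gaultier",
   "helmut lang", "raf simons", "bottega veneta", "dior homme",
   "undercover", "balenciaga", "kapital", "number nine",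
   "alexander mcqueen", "thierry mugler", "vivienne westwood",
   "julius", "ann demeulemeester", "dries van noten", "yohji yamamoto",
   "prada", "guidi", "acne studios", "carol christian poell"]

-- ===== PORT A =====
-- the for-loop with early return over the length-sorted list
def pvBrandLoopA (ql : String) : List String → Option String
  | [] => none
  | b :: rest => if PySem.Str.startswith ql b then some b else pvBrandLoopA ql rest

def extract_brand_from_query_py (query : String) : String :=
  let query_lower := PySem.Str.lower query
  match pvBrandLoopA query_lower
      (PySem.List.sorted pvKnownBrands (fun b => PySem.Str.len b) true) with
  | some b => pvTitle b
  | none =>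
      if query ≠ "" then
        pvTitle (PySem.List.pyGetD (PySem.Str.split₀ query) 0 "")  -- query.split()[0]; Pre_ keeps the index in range
      else "Unknown"

-- ===== PORT B =====
-- brand_set = set(known_brands)
def pvBrandSet : PySem.Set String := PySem.Set.ofList pvKnownBrands
-- max_len = max(len(b) for b in known_brands): max of a nonempty iterable as the running-max loop
-- (PySem.List.max?_id_cons: Python's max IS this fold)
def pvMaxBrandLen : Nat :=
  match pvKnownBrands.map (fun b => b.toList.length) with
  | [] => 0      -- unreachable: the literal list is nonempty (Python max would raise on [])
  | n :: rest => rest.foldl max n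

-- for length in range(min(len(query_lower), max_len), 0, -1): if query_lower[:length] in brand_set: return …
def pvPrefLoopB (ql : List Char) : Nat → Option (List Char)
  | 0 => none
  | Nat.succ L =>
      let prefix_ := ql.take (L + 1)
      if String.ofList prefix_ ∈ pvBrandSet then some prefix_ else pvPrefLoopB ql L

def extract_brand_from_query_py_alt (query : String) : String :=
  let query_lower := PySem.Str.lower query
  match pvPrefLoopB query_lower.toList (min query_lower.toList.length pvMaxBrandLen) with
  | some p => pvTitle (String.ofList p)
  | none =>
      if query ≠ "" then
        pvTitle (PySem.List.pyGetD (PySem.Str.split₀ query) 0 "")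
      else "Unknown"

-- ===== PRECONDITION & SPEC =====
-- Pre_ excludes exactly the nonempty all-whitespace queries: there no brand matches, query.split() is
-- empty and A's query.split()[0] raises IndexError (B raises there too).
def Pre_extract_brand_from_query_py (query : String) : Prop :=
  PySem.Str.strIsspace query = false
instance (query : String) : Decidable (Pre_extract_brand_from_query_py query) := by
  unfold Pre_extract_brand_from_query_py; infer_instance

def pvWitness_extract_brand_from_query_py : String := "prada bag"

def Spec_extract_brand_from_query_py (query : String) (out : String) : Prop := out = extract_brand_from_query_py_alt query
instance (query : String) (out : String) : Decidable (Spec_extract_brand_from_query_py query out) := by unfold Spec_extract_brand_from_query_py; infer_instance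

-- ===== CLAIM (what is proved, stated in full; the proofs are below) =====
def Claim_equal_extract_brand_from_query_py : Prop := ∀ (query : String), Dom_extract_brand_from_query_py query → Pre_extract_brand_from_query_py query → Spec_extract_brand_from_query_py query (extract_brand_from_query_py query)

-- ===== LEMMAS AND PROOFS =====

-- every brand is 1..pvMaxBrandLen characters long
lemma pvBrand_len_bounds :
    ∀ b ∈ pvKnownBrands, 1 ≤ b.toList.length ∧ b.toList.length ≤ pvMaxBrandLen := by decide

-- the A-loop returns none exactly when nothing matches
lemma pvBrandLoopA_eq_none_iff (ql : String) (M : List String) :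
    pvBrandLoopA ql M = none ↔ ∀ b ∈ M, PySem.Str.startswith ql b = false := by
  induction M with
  | nil =>
      constructor
      · intro _ b hb; exact absurd hb (List.not_mem_nil)
      · intro _; rfl
  | cons b rest ih =>
      constructor
      · intro h b' hb'
        by_cases hp : PySem.Str.startswith ql b = true
        · have : pvBrandLoopA ql (b :: rest) = some b := by
            simp only [pvBrandLoopA, if_pos hp]
          rw [this] at h; cases h
        · have hb0 : PySem.Str.startswith ql b = false := Bool.eq_false_iff.mpr hp
          have hrest : pvBrandLoopA ql rest = none := by
            simpa only [pvBrandLoopA, if_neg hp] using h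
          rcases List.mem_cons.mp hb' with rfl | hm
          · exact hb0
          · exact (ih.mp hrest) b' hm
      · intro hall
        have hp : PySem.Str.startswith ql b ≠ true := by
          rw [hall b List.mem_cons_self]; exact Bool.false_ne_true
        simp only [pvBrandLoopA, if_neg hp]
        exact ih.mpr (fun x hx => hall x (List.mem_cons_of_mem _ hx))

-- a successful A-loop result is a match, and on a length-descending list it is a longest match
lemma pvBrandLoopA_some (ql : String) (M : List String) (m : String)
    (hs : M.Pairwise (fun a b => PySem.Str.len b ≤ PySem.Str.len a))
    (h : pvBrandLoopA ql M = some m) :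
    m ∈ M ∧ PySem.Str.startswith ql m = true ∧
      ∀ b ∈ M, PySem.Str.startswith ql b = true → PySem.Str.len b ≤ PySem.Str.len m := by
  induction M with
  | nil => cases h
  | cons c rest ih =>
      rcases List.pairwise_cons.mp hs with ⟨hc, hrest⟩
      by_cases hp : PySem.Str.startswith ql c = true
      · have hcm : c = m := by
          have : pvBrandLoopA ql (c :: rest) = some c := by
            simp only [pvBrandLoopA, if_pos hp]
          rw [this] at h; exact Option.some_injective _ h
        subst hcm
        refine ⟨List.mem_cons_self, hp, ?_⟩
        intro b hb _
        rcases List.mem_cons.mp hb with rfl | hb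
        · exact le_refl _
        · exact hc b hb
      · have h' : pvBrandLoopA ql rest = some m := by
          simpa only [pvBrandLoopA, if_neg hp] using h
        rcases ih hrest h' with ⟨hm, hpm, hmax⟩
        refine ⟨List.mem_cons_of_mem _ hm, hpm, ?_⟩
        intro b hb hpb
        rcases List.mem_cons.mp hb with rfl | hb
        · exact absurd hpb hp
        · exact hmax b hb hpb

-- B's loop finds nothing when no prefix length in 1..L is a brand
lemma pvPrefLoopB_eq_none (ql : List Char) (L : Nat)
    (h : ∀ k, 1 ≤ k → k ≤ L → String.ofList (ql.take k) ∉ pvBrandSet) :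
    pvPrefLoopB ql L = none := by
  induction L with
  | zero => rfl
  | succ L ih =>
      have hnot : String.ofList (ql.take (L + 1)) ∉ pvBrandSet :=
        h (L + 1) (by omega) (le_refl _)
      simp only [pvPrefLoopB, if_neg hnot]
      exact ih (fun k h1 h2 => h k h1 (by omega))

-- B's loop returns take k0 when k0 is a matching length and no larger length ≤ L matches
lemma pvPrefLoopB_eq_some (ql : List Char) (L k0 : Nat)
    (h1 : 1 ≤ k0) (hk : k0 ≤ L)
    (hm : String.ofList (ql.take k0) ∈ pvBrandSet)
    (hmax : ∀ k, k0 < k → k ≤ L → String.ofList (ql.take k) ∉ pvBrandSet) :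
    pvPrefLoopB ql L = some (ql.take k0) := by
  induction L with
  | zero => omega
  | succ L ih =>
      by_cases he : k0 = L + 1
      · subst he
        simp only [pvPrefLoopB, if_pos hm]
      · have hlt : k0 ≤ L := by omega
        have hnot : String.ofList (ql.take (L + 1)) ∉ pvBrandSet :=
          hmax (L + 1) (by omega) (le_refl _)
        simp only [pvPrefLoopB, if_neg hnot]
        exact ih hlt (fun k hk1 hk2 => hmax k hk1 (by omega))

-- membership in the brand set, read back as a matching brand
lemma pvSet_mem_iff (p : List Char) :
    String.ofList p ∈ pvBrandSet ↔ String.ofList p ∈ pvKnownBrands := by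
  unfold pvBrandSet
  exact PySem.Set.mem_ofList pvKnownBrands (String.ofList p)

-- startswith unpacked: b matches ql iff b's characters are ql's first len(b) characters
lemma pvStartswith_iff (ql b : String) :
    PySem.Str.startswith ql b = true ↔ b.toList = ql.toList.take b.toList.length := by
  rw [PySem.Str.startswith_eq, PySem.Chars.startswith_iff]
  exact ⟨fun h => List.prefix_iff_eq_take.mp h, fun h => List.prefix_iff_eq_take.mpr h⟩

-- core: A's first match over the length-descending sort = B's longest brand-prefix of the query
lemma pvLoops_agree (ql : String) :
    (pvBrandLoopA ql (PySem.List.sorted pvKnownBrands (fun b => PySem.Str.len b) true)).map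
        (fun b => pvTitle b)
      = (pvPrefLoopB ql.toList (min ql.toList.length pvMaxBrandLen)).map
        (fun p => pvTitle (String.ofList p)) := by
  set M := PySem.List.sorted pvKnownBrands (fun b => PySem.Str.len b) true with hM
  have hperm : M.Perm pvKnownBrands := PySem.List.sorted_perm _ _ _
  cases hA : pvBrandLoopA ql M with
  | none =>
      have hall := (pvBrandLoopA_eq_none_iff ql M).mp hA
      have hB : pvPrefLoopB ql.toList (min ql.toList.length pvMaxBrandLen) = none := by
        apply pvPrefLoopB_eq_none
        intro k hk1 hk2 hmem
        have hb : String.ofList (ql.toList.take k) ∈ pvKnownBrands :=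
          (pvSet_mem_iff _).mp hmem
        have hkle : k ≤ ql.toList.length := le_trans hk2 (min_le_left _ _)
        have hlen : (String.ofList (ql.toList.take k)).toList.length = k := by
          simp only [String.toList_ofList, List.length_take]
          omega
        have hsw : PySem.Str.startswith ql (String.ofList (ql.toList.take k)) = true := by
          rw [pvStartswith_iff, hlen]
          simp
        have := hall _ (hperm.mem_iff.mpr hb)
        rw [this] at hsw; cases hsw
      rw [hB]; rfl
  | some m =>
      have hs : M.Pairwise (fun a b => PySem.Str.len b ≤ PySem.Str.len a) :=
        PySem.List.sorted_pairwise_rev _ _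
      rcases pvBrandLoopA_some ql M m hs hA with ⟨hmM, hpm, hmaxA⟩
      have hmK : m ∈ pvKnownBrands := hperm.mem_iff.mp hmM
      rcases pvBrand_len_bounds m hmK with ⟨hm1, hm2⟩
      have hmtake : m.toList = ql.toList.take m.toList.length := (pvStartswith_iff ql m).mp hpm
      have hmlenle : m.toList.length ≤ ql.toList.length := by
        have := congrArg List.length hmtake
        rw [List.length_take] at this
        omega
      have hB : pvPrefLoopB ql.toList (min ql.toList.length pvMaxBrandLen)
          = some (ql.toList.take m.toList.length) := by
        apply pvPrefLoopB_eq_some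
        · exact hm1
        · exact le_min hmlenle hm2
        · rw [pvSet_mem_iff, ← hmtake]
          simpa using hmK
        · intro k hkgt hkle hmem
          have hb : String.ofList (ql.toList.take k) ∈ pvKnownBrands :=
            (pvSet_mem_iff _).mp hmem
          have hkle' : k ≤ ql.toList.length := le_trans hkle (min_le_left _ _)
          have hlen : (String.ofList (ql.toList.take k)).toList.length = k := by
            simp only [String.toList_ofList, List.length_take]
            omega
          have hsw : PySem.Str.startswith ql (String.ofList (ql.toList.take k)) = true := by
            rw [pvStartswith_iff, hlen]
            simp
          have hle := hmaxA _ (hperm.mem_iff.mpr hb) hsw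
          rw [PySem.Str.len_eq, PySem.Str.len_eq] at hle
          omega
      rw [hB]
      simp only [Option.map_some]
      congr 1
      rw [← hmtake, String.ofList_toList]

-- ===== VERDICT (by name: the statement is the Claim_ definition above) =====
theorem extract_brand_from_query_py_spec : Claim_equal_extract_brand_from_query_py := by
  intro query _ _
  unfold Spec_extract_brand_from_query_py
  simp only [extract_brand_from_query_py, extract_brand_from_query_py_alt]
  have h := pvLoops_agree (PySem.Str.lower query)
  cases hA : pvBrandLoopA (PySem.Str.lower query)
      (PySem.List.sorted pvKnownBrands (fun b => PySem.Str.len b) true) with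
  | none =>
      rw [hA] at h
      cases hB : pvPrefLoopB (PySem.Str.lower query).toList
          (min (PySem.Str.lower query).toList.length pvMaxBrandLen) with
      | none => rfl
      | some p => rw [hB] at h; cases h
  | some m =>
      rw [hA] at h
      cases hB : pvPrefLoopB (PySem.Str.lower query).toList
          (min (PySem.Str.lower query).toList.length pvMaxBrandLen) with
      | none => rw [hB] at h; cases h
      | some p =>
          rw [hB] at h
          simpa using h
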